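-- pv_equiv track=rewrite | github.com/deftasparagusanaconda/scipy-fft-processing-lib | AIMP 20-band Exporter/impulse to 20-band list.py | nearest_two
-- ===== SOURCE A (Python) =====
-- def nearest_two(target,list):
-- 	if list[0] > target:
-- 		return(0,1)
-- 	elif list[-1] < target:
-- 		return(-2,-1)
-- 	else:
-- 		low = 0
-- 		high = -1
-- 		for i in range(len(list)):
-- 			if list[i] <= target:
-- 				low = i
-- 			else:
-- 				break
-- 		for i in range(len(list)):
-- 			if list[::-1][i] >= target:
-- 				high = len(list)-i-1
-- 			else:
-- 				break
-- 		return(low,high)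
-- ===== SOURCE B (Python) =====
-- def nearest_two(target, list):
--     if list[0] > target:
--         return (0, 1)
--     if list[-1] < target:
--         return (-2, -1)
--     # single fused forward pass: track the lower bracket while still inside the
--     # leading run of elements <= target, and a running length of the current
--     # run of elements >= target (its final value is the trailing run).
--     n = len(list)
--     low = n - 1
--     run = 0
--     scanning = True
--     for i, v in enumerate(list):
--         if scanning and v > target:
--             low = i - 1
--             scanning = False
--         run = run + 1 if v >= target else 0
--     return (low, n - run)
-- ===== Notes on version B (the rewrite author's own statement) =====
-- stated objective: faster
-- what changed: A runs two staged index loops, the second of which rebuilds the reversed list with list[::-1] on every iteration (quadratic); B makes one fused forward pass that tracks the lower bracket while still inside the leading run of elements <= target and a running length of the current run of elements >= target, whose final value is the trailing run.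
import Mathlib
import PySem

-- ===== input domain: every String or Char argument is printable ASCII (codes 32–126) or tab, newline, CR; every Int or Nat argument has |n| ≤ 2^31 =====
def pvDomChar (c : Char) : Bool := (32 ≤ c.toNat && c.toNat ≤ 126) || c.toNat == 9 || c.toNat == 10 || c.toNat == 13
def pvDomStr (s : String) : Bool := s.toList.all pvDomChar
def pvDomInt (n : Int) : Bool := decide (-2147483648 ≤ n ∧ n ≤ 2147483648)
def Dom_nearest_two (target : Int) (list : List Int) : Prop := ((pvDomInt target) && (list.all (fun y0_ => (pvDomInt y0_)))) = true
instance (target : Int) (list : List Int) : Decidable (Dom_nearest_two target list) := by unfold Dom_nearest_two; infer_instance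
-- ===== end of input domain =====

-- ===== PORT A =====
-- B replaces A's two staged scans (the second re-slicing list[::-1] each iteration) by one
-- fused forward pass maintaining the lower bracket and a running ≥-target run length.

-- A's first loop: 'for i in range(len(list)): if list[i] <= target: low = i else: break'
def aLowLoop (target : Int) : List Int → Int → Int → Int
  | [], _, low => low
  | x :: xs, i, low => if x ≤ target then aLowLoop target xs (i + 1) i else low

-- A's second loop over list[::-1]; the slice has the same value on every iteration, so it is
-- reversed once here (list[::-1] = list.reverse):
-- 'for i in range(len(list)): if list[::-1][i] >= target: high = len(list)-i-1 else: break'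
def aHighLoop (target n : Int) : List Int → Int → Int → Int
  | [], _, high => high
  | x :: xs, i, high => if x ≥ target then aHighLoop target n xs (i + 1) (n - i - 1) else high

def nearest_two (target : Int) (list : List Int) : List Int :=
  match PySem.List.pyGet? list 0, PySem.List.pyGet? list (-1) with
  | some first, some last =>
    if first > target then [0, 1]
    else if last < target then [-2, -1]
    else
      let low := aLowLoop target list 0 0
      let high := aHighLoop target (list.length : Int) list.reverse 0 (-1)
      [low, high]
  | _, _ => []  -- list[0] raises IndexError on the empty list; excluded by Pre_nearest_two

-- ===== PORT B =====
-- B's fused loop body: 'if scanning and v > target: low = i - 1; scanning = False' then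
-- 'run = run + 1 if v >= target else 0'; state (low, run, scanning)
def bStep (target : Int) (s : Int × Int × Bool) (iv : Int × Int) : Int × Int × Bool :=
  let s' := if s.2.2 && decide (iv.2 > target) then (iv.1 - 1, false) else (s.1, s.2.2)
  (s'.1, if iv.2 ≥ target then s.2.1 + 1 else 0, s'.2)

def nearest_two_alt (target : Int) (list : List Int) : List Int :=
  match PySem.List.pyGet? list 0 with
  | none => []  -- list[0] raises IndexError on the empty list; excluded by Pre_nearest_two
  | some first =>
    match PySem.List.pyGet? list (-1) with
    | none => []
    | some last =>
      if first > target then [0, 1]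
      else if last < target then [-2, -1]
      else
        let n : Int := list.length
        let st := (PySem.List.enumerate list).foldl (bStep target) (n - 1, 0, true)
        [st.1, n - st.2.1]

-- ===== PRECONDITION & SPEC =====
-- Pre_ excludes only the empty list, on which A raises IndexError at list[0].
def Pre_nearest_two (target : Int) (list : List Int) : Prop := list ≠ []
instance (target : Int) (list : List Int) : Decidable (Pre_nearest_two target list) := by
  unfold Pre_nearest_two; infer_instance
def pvWitness_nearest_two : Int × List Int := (3, [1, 2, 3, 3, 5])

def Spec_nearest_two (target : Int) (list : List Int) (out : List Int) : Prop := out = nearest_two_alt target list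
instance (target : Int) (list : List Int) (out : List Int) : Decidable (Spec_nearest_two target list out) := by unfold Spec_nearest_two; infer_instance

-- ===== CLAIM (what is proved, stated in full; the proofs are below) =====
def Claim_equal_nearest_two : Prop := ∀ (target : Int) (list : List Int), Dom_nearest_two target list → Pre_nearest_two target list → Spec_nearest_two target list (nearest_two target list)

-- ===== LEMMAS AND PROOFS =====
lemma aLowLoop_eq (target : Int) : ∀ (xs : List Int) (i low : Int),
    aLowLoop target xs i low =
      if (xs.takeWhile (fun v => decide (v ≤ target))).length = 0 then low
      else i + (xs.takeWhile (fun v => decide (v ≤ target))).length - 1 := by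
  intro xs
  induction xs with
  | nil => intro i low; simp [aLowLoop]
  | cons x xs ih =>
    intro i low
    by_cases h : x ≤ target
    · have htw : List.takeWhile (fun v => decide (v ≤ target)) (x :: xs)
          = x :: List.takeWhile (fun v => decide (v ≤ target)) xs := by simp [h]
      rw [aLowLoop, if_pos h, ih, htw, List.length_cons]
      split_ifs with h1 h2 <;> (try contradiction) <;> push_cast <;> omega
    · rw [aLowLoop, if_neg h, List.takeWhile_cons]
      simp [h]

lemma aHighLoop_eq (target n : Int) : ∀ (xs : List Int) (i high : Int),
    aHighLoop target n xs i high =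
      if (xs.takeWhile (fun v => decide (target ≤ v))).length = 0 then high
      else n - i - (xs.takeWhile (fun v => decide (target ≤ v))).length := by
  intro xs
  induction xs with
  | nil => intro i high; simp [aHighLoop]
  | cons x xs ih =>
    intro i high
    by_cases h : target ≤ x
    · have htw : List.takeWhile (fun v => decide (target ≤ v)) (x :: xs)
          = x :: List.takeWhile (fun v => decide (target ≤ v)) xs := by simp [h]
      rw [aHighLoop, if_pos h, ih, htw, List.length_cons]
      split_ifs with h1 h2 <;> (try contradiction) <;> push_cast <;> omega
    · rw [aHighLoop, if_neg h, List.takeWhile_cons]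
      simp [h]

-- reversing a cons as an append, for the trailing-run argument
lemma trailing_cons (target x : Int) (xs : List Int) :
    (((x :: xs).reverse).takeWhile (fun v => decide (target ≤ v))).length =
      if ∀ y ∈ xs, target ≤ y then
        (if target ≤ x then xs.length + 1 else xs.length)
      else ((xs.reverse).takeWhile (fun v => decide (target ≤ v))).length := by
  have hrev : (x :: xs).reverse = xs.reverse ++ [x] := by simp
  rw [hrev, List.takeWhile_append]
  by_cases hall : ∀ y ∈ xs, target ≤ y
  · have hself : (xs.reverse).takeWhile (fun v => decide (target ≤ v)) = xs.reverse := by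
      rw [List.takeWhile_eq_self_iff]
      intro y hy; simpa using hall y (by simpa using hy)
    rw [if_pos (by rw [hself]), if_pos hall]
    by_cases hx : target ≤ x <;> simp [hx]
  · have hne : (xs.reverse).takeWhile (fun v => decide (target ≤ v)) ≠ xs.reverse := by
      intro hEq
      exact hall (fun y hy => by
        have := (List.takeWhile_eq_self_iff.mp hEq) y (by simpa using hy)
        simpa using this)
    rw [if_neg (fun hlen => hne ((List.takeWhile_prefix _).eq_of_length hlen)), if_neg hall]

-- the fused B fold, characterised in one shot
lemma bFold_eq (target : Int) : ∀ (xs : List Int) (i0 low r : Int) (b : Bool),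
    (PySem.List.enumerate xs i0).foldl (bStep target) (low, r, b) =
      ( if b = true ∧ ¬(∀ x ∈ xs, x ≤ target) then
          i0 + ((xs.takeWhile (fun v => decide (v ≤ target))).length : Int) - 1
        else low,
        if ∀ x ∈ xs, target ≤ x then r + xs.length
        else (((xs.reverse).takeWhile (fun v => decide (target ≤ v))).length : Int),
        b && decide (∀ x ∈ xs, x ≤ target) ) := by
  intro xs
  induction xs with
  | nil => intro i0 low r b; simp [PySem.List.enumerate]
  | cons x xs ih =>
    intro i0 low r b
    rw [PySem.List.enumerate_cons, List.foldl_cons]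
    by_cases hxle : x ≤ target
    · have hx' : decide (x > target) = false := by simp; omega
      simp only [bStep, hx', Bool.and_false, if_neg Bool.false_ne_true, ge_iff_le]
      rw [ih, trailing_cons]
      simp only [List.mem_cons, forall_eq_or_imp, List.takeWhile_cons, hxle, decide_true,
        if_true, List.length_cons, true_and]
      refine Prod.ext ?_ (Prod.ext ?_ ?_)
      · simp only []
        split_ifs with h1 <;> [skip; rfl]
        push_cast; ring
      · simp only []
        by_cases h2 : ∀ y ∈ xs, target ≤ y
        · by_cases hge : target ≤ x
          · simp only [if_pos h2, if_pos hge,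
              if_pos (⟨hge, h2⟩ : target ≤ x ∧ ∀ y ∈ xs, target ≤ y)]
            push_cast; ring
          · have hno : ¬(target ≤ x ∧ ∀ y ∈ xs, target ≤ y) := fun hc => hge hc.1
            simp only [if_pos h2, if_neg hge, if_neg hno]
            ring
        · have hno : ¬(target ≤ x ∧ ∀ y ∈ xs, target ≤ y) := fun hc => h2 hc.2
          simp only [if_neg h2, if_neg hno]
      · simp only []
    · have hx' : decide (x > target) = true := by simp; omega
      have hge : target ≤ x := by omega
      simp only [bStep, hx', Bool.and_true, ge_iff_le, if_pos hge]
      have htw0 : (List.takeWhile (fun v => decide (v ≤ target)) (x :: xs)) = [] := by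
        simp [hxle]
      have hrun :
          (if ∀ y ∈ xs, target ≤ y then r + 1 + (xs.length : Int)
            else (((xs.reverse).takeWhile (fun v => decide (target ≤ v))).length : Int)) =
          (if ∀ y ∈ x :: xs, target ≤ y then r + ((x :: xs).length : Int)
            else ((((x :: xs).reverse).takeWhile (fun v => decide (target ≤ v))).length : Int)) := by
        rw [trailing_cons]
        by_cases h2 : ∀ y ∈ xs, target ≤ y
        · have hall : ∀ y ∈ x :: xs, target ≤ y := by
            intro y hy; rcases List.mem_cons.mp hy with rfl | hy
            · exact hge
            · exact h2 y hy
          simp only [if_pos h2, if_pos hall, List.length_cons]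
          push_cast; ring
        · have hno : ¬ ∀ y ∈ x :: xs, target ≤ y :=
            fun hc => h2 (fun y hy => hc y (List.mem_cons_of_mem _ hy))
          simp only [if_neg h2, if_neg hno, if_pos hge]
      have hnotall : ¬ ∀ y ∈ x :: xs, y ≤ target := by
        intro h; exact hxle (h x List.mem_cons_self)
      have hflag : decide (∀ y ∈ x :: xs, y ≤ target) = false := by
        simpa using hnotall
      cases b with
      | false =>
        rw [if_neg (by simp)]
        rw [ih]
        refine Prod.ext ?_ (Prod.ext ?_ ?_)
        · simp
        · exact hrun
        · simp
      | true =>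
        rw [if_pos rfl, ih]
        refine Prod.ext ?_ (Prod.ext ?_ ?_)
        · rw [if_neg (by simp : ¬(false = true ∧ ¬∀ y ∈ xs, y ≤ target)), htw0]
          rw [if_pos (⟨rfl, hnotall⟩ : true = true ∧ ¬∀ y ∈ x :: xs, y ≤ target)]
          simp
        · exact hrun
        · simp only [Bool.false_and, Bool.true_and, hflag]

theorem nearest_two_eq_alt (target : Int) (list : List Int) (hpre : list ≠ []) :
    nearest_two target list = nearest_two_alt target list := by
  obtain ⟨y, ys, rfl⟩ : ∃ y ys, list = y :: ys := by
    cases list with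
    | nil => exact absurd rfl hpre
    | cons a l => exact ⟨a, l, rfl⟩
  have h0 : PySem.List.pyGet? (y :: ys) 0 = some y := by simp [pysem]
  have h1 : PySem.List.pyGet? (y :: ys) (-1) = some ((y :: ys)[ys.length]) := by simp [pysem]
  unfold nearest_two nearest_two_alt
  rw [h0, h1]
  by_cases hf : y > target
  · simp [hf]
  by_cases hl : (y :: ys)[ys.length] < target
  · simp [hf, hl]
  simp only [if_neg hf, if_neg hl]
  have hy : y ≤ target := by omega
  have hne : (y :: ys) ≠ [] := by simp
  have hlast : (y :: ys).getLast hne = (y :: ys)[ys.length] := by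
    rw [List.getLast_eq_getElem]
    exact getElem_congr_idx (by simp)
  have hge : target ≤ (y :: ys).getLast hne := by rw [hlast]; omega
  have hrev : (y :: ys).reverse = (y :: ys).getLast hne :: (y :: ys).dropLast.reverse := by
    conv_lhs => rw [← List.dropLast_concat_getLast hne]
    simp
  -- the two run lengths, both nonzero
  have hLpos : (((y :: ys).takeWhile (fun v => decide (v ≤ target))).length) ≠ 0 := by
    simp [hy]
  have hTcons : ((y :: ys).reverse).takeWhile (fun v => decide (target ≤ v))
      = (y :: ys).getLast hne
        :: ((y :: ys).dropLast.reverse).takeWhile (fun v => decide (target ≤ v)) := by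
    rw [hrev, List.takeWhile_cons, if_pos (by simpa using hge)]
  have hTpos : ((((y :: ys).reverse).takeWhile (fun v => decide (target ≤ v))).length) ≠ 0 := by
    rw [hTcons]; simp
  rw [bFold_eq, aLowLoop_eq, aHighLoop_eq]
  rw [if_neg hLpos, if_neg hTpos]
  simp only [List.cons.injEq, and_true]
  constructor
  · -- low components
    by_cases hall : ∀ x ∈ (y :: ys), x ≤ target
    · rw [if_neg (fun h => h.2 hall)]
      have hfull : (y :: ys).takeWhile (fun v => decide (v ≤ target)) = y :: ys := by
        rw [List.takeWhile_eq_self_iff]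
        intro v hv; simpa using hall v hv
      rw [hfull]
      ring
    · rw [if_pos ⟨trivial, hall⟩]
  · -- high components
    by_cases hall : ∀ x ∈ (y :: ys), target ≤ x
    · rw [if_pos hall]
      have hfull : ((y :: ys).reverse).takeWhile (fun v => decide (target ≤ v))
          = (y :: ys).reverse := by
        rw [List.takeWhile_eq_self_iff]
        intro v hv; simpa using hall v (List.mem_reverse.mp hv)
      rw [hfull, List.length_reverse]
      ring
    · rw [if_neg hall]
      ring

-- ===== VERDICT (by name: the statement is the Claim_ definition above) =====
theorem nearest_two_spec : Claim_equal_nearest_two := by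
  intro target list _ hpre
  unfold Spec_nearest_two
  exact nearest_two_eq_alt target list hpre
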